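-- pv_equiv track=rewrite | github.com/0vchina/HomeWork | Lessons_9/24.07.24.py | compas
-- ===== SOURCE A (Python) =====
-- def compas(comp):
--     x, y = 0, 0
--     for value in comp:
--         if value.lower() == 's':
--             y -= 1
--         elif value.lower() == 'w':
--             x -= 1
--         elif value.lower() == 'e':
--             x += 1
--         elif value.lower() == 'n':
--             y += 1
--     return tuple([x,y])
-- ===== SOURCE B (Python) =====
-- def compas(comp):
--     low = [v.lower() for v in comp]
--     return (low.count('e') - low.count('w'), low.count('n') - low.count('s'))
-- ===== Notes on version B (the rewrite author's own statement) =====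
-- stated objective: idiomatic
-- what changed: Replaces the single branching accumulation loop over (x,y) with a count-then-derive decomposition: lowercase all elements once, then compute each coordinate as a difference of counts.
import Mathlib
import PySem

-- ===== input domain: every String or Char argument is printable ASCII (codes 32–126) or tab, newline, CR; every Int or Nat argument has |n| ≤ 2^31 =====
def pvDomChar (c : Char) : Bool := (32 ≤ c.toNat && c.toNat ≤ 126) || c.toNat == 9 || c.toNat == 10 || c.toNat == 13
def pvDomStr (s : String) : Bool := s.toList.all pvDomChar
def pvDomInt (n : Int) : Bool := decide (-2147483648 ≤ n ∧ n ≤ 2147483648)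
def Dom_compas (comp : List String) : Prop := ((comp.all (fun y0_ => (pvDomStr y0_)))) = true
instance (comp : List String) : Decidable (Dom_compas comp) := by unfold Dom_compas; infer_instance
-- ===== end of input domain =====

-- ===== PORT A =====
def compas (comp : List String) : Int × Int :=
  comp.foldl (fun (p : Int × Int) value =>
    if PySem.Str.lower value == "s" then (p.1, p.2 - 1)
    else if PySem.Str.lower value == "w" then (p.1 - 1, p.2)
    else if PySem.Str.lower value == "e" then (p.1 + 1, p.2)
    else if PySem.Str.lower value == "n" then (p.1, p.2 + 1)
    else p) (0, 0)

-- ===== PORT B =====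
def compas_alt (comp : List String) : Int × Int :=
  let low := comp.map PySem.Str.lower
  ((low.count "e" : Int) - (low.count "w" : Int),
   (low.count "n" : Int) - (low.count "s" : Int))

-- ===== PRECONDITION & SPEC =====
def Spec_compas (comp : List String) (out : Int × Int) : Prop := out = compas_alt comp
instance (comp : List String) (out : Int × Int) : Decidable (Spec_compas comp out) := by unfold Spec_compas; infer_instance

-- ===== CLAIM (what is proved, stated in full; the proofs are below) =====
def Claim_equal_compas : Prop := ∀ (comp : List String), Dom_compas comp → Spec_compas comp (compas comp)

-- ===== LEMMAS AND PROOFS =====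

-- ===== VERDICT (by name: the statement is the Claim_ definition above) =====
theorem compas_loop (comp : List String) (x y : Int) :
    comp.foldl (fun (p : Int × Int) value =>
      if PySem.Str.lower value == "s" then (p.1, p.2 - 1)
      else if PySem.Str.lower value == "w" then (p.1 - 1, p.2)
      else if PySem.Str.lower value == "e" then (p.1 + 1, p.2)
      else if PySem.Str.lower value == "n" then (p.1, p.2 + 1)
      else p) (x, y)
    = (x + ((comp.map PySem.Str.lower).count "e" : Int) - ((comp.map PySem.Str.lower).count "w" : Int),
       y + ((comp.map PySem.Str.lower).count "n" : Int) - ((comp.map PySem.Str.lower).count "s" : Int)) := by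
  induction comp generalizing x y with
  | nil => simp
  | cons h t ih =>
    simp only [List.foldl_cons, List.map_cons, List.count_cons]
    by_cases hs : PySem.Str.lower h = "s" <;>
    by_cases hw : PySem.Str.lower h = "w" <;>
    by_cases he : PySem.Str.lower h = "e" <;>
    by_cases hn : PySem.Str.lower h = "n" <;>
    simp_all [ih] <;> push_cast <;> ring

theorem compas_spec : Claim_equal_compas := by
  intro comp _
  unfold Spec_compas compas compas_alt
  simp only [compas_loop comp 0 0]
  simp
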